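-- pv_equiv track=rewrite | github.com/h-badams/nd-game | game.py | enumerate_points
-- ===== SOURCE A (Python) =====
-- def enumerate_points(dim, width):
--     coords = []
--     curr = [0 for i in range(dim)]
--     for i in range(width ** dim):
--         coords.append(tuple(i for i in curr))
--         if i != (width ** dim) - 1:
--             pointer = 0
--             while curr[pointer] == width - 1:
--                 curr[pointer] = 0
--                 pointer += 1
--             curr[pointer] += 1
--     return coords
-- ===== SOURCE B (Python) =====
-- def enumerate_points(dim, width):
--     total = width ** dim
--     return [tuple((i // width ** k) % width for k in range(dim)) for i in range(total)]
-- ===== Notes on version B (the rewrite author's own statement) =====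
-- stated objective: simpler
-- what changed: Replaces the stateful odometer/carry loop (a mutable curr list incremented with a while-carry per step) by a closed-form mixed-radix digit extraction (i // width**k) % width for each linear index i.
-- outside the precondition, e.g. on enumerate_points(-1, 2): A raises TypeError, B raises TypeError
import Mathlib
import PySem

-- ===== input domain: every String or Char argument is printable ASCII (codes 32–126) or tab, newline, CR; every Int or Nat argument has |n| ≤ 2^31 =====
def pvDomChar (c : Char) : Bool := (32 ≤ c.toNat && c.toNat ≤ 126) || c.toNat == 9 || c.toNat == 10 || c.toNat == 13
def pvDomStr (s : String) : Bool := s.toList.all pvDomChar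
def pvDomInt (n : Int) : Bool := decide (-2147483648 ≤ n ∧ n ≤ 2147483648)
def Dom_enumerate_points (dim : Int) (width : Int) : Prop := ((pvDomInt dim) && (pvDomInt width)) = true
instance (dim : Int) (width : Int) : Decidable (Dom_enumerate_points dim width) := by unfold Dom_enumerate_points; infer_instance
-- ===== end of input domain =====

-- B replaces A's mutable odometer/carry loop by a closed-form mixed-radix digit
-- extraction per linear index (objective: simpler).

-- ===== PORT A =====
-- the while-carry: walk curr from index 0, zeroing maximal digits, then increment
-- the first non-maximal digit ([] is where Python would raise IndexError; it is
-- unreachable inside Pre_)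
def pyCarry (width : Int) : List Int → List Int
  | [] => []
  | x :: xs => if x = width - 1 then 0 :: pyCarry width xs else (x + 1) :: xs

def enumerate_points (dim : Int) (width : Int) : List (List Int) :=
  let total : Int := width ^ dim.toNat
  (((PySem.List.pyRange 0 total 1).foldl
    (fun (st : List (List Int) × List Int) i =>
      let coords := st.1 ++ [st.2]
      let curr := if i ≠ total - 1 then pyCarry width st.2 else st.2
      (coords, curr))
    ([], List.replicate dim.toNat 0))).1

-- ===== PORT B =====
def enumerate_points_alt (dim : Int) (width : Int) : List (List Int) :=
  let total : Int := width ^ dim.toNat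
  (PySem.List.pyRange 0 total 1).map (fun i =>
    (PySem.List.pyRange 0 dim 1).map (fun k =>
      PySem.Int.mod (PySem.Int.floordiv i (width ^ k.toNat)) width))

-- ===== PRECONDITION & SPEC =====
-- Pre_ excludes dim < 0, where A raises (TypeError/ZeroDivisionError from width**dim),
-- and the accidental corner width ≤ -2 with even dim ≥ 2, where A's carry test
-- (curr[pointer] == width - 1) never fires and it returns a single-axis counting
-- sequence instead of anything mixed-radix-like.
def Pre_enumerate_points (dim : Int) (width : Int) : Prop :=
  0 ≤ dim ∧ (0 ≤ width ∨ dim = 0 ∨ dim % 2 = 1 ∨ width = -1)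
instance (dim : Int) (width : Int) : Decidable (Pre_enumerate_points dim width) := by
  unfold Pre_enumerate_points; infer_instance
def pvWitness_enumerate_points : Int × Int := (2, 2)

def Spec_enumerate_points (dim : Int) (width : Int) (out : List (List Int)) : Prop := out = enumerate_points_alt dim width
instance (dim : Int) (width : Int) (out : List (List Int)) : Decidable (Spec_enumerate_points dim width out) := by unfold Spec_enumerate_points; infer_instance

-- ===== CLAIM (what is proved, stated in full; the proofs are below) =====
def Claim_equal_enumerate_points : Prop := ∀ (dim : Int) (width : Int), Dom_enumerate_points dim width → Pre_enumerate_points dim width → Spec_enumerate_points dim width (enumerate_points dim width)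

-- ===== LEMMAS AND PROOFS =====

-- the mixed-radix digit string of n, least-significant first
def digs (width : Int) (d : Nat) (n : Int) : List Int :=
  (List.range d).map (fun k => n / width ^ k % width)

theorem digs_zero (width : Int) (d : Nat) : digs width d 0 = List.replicate d 0 := by
  simp [digs]

theorem digs_succ (width : Int) (hW : 0 ≤ width) (d : Nat) (n : Int) :
    digs width (d + 1) n = (n % width) :: digs width d (n / width) := by
  simp only [digs, List.range_succ_eq_map, List.map_cons, List.map_map]
  congr 1
  · simp
  · apply List.map_congr_left
    intro k _
    simp only [Function.comp]
    rw [pow_succ', ← Int.ediv_ediv_of_nonneg hW]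

theorem carry_digs (width : Int) (hW : 0 ≤ width) :
    ∀ (d : Nat) (n : Int), 0 ≤ n → n + 1 < width ^ d →
      pyCarry width (digs width d n) = digs width d (n + 1) := by
  intro d
  induction d with
  | zero => intro n hn h; simp at h; omega
  | succ d ih =>
    intro n hn h
    have hW2 : 2 ≤ width := by
      by_contra hlt
      have h01 : width = 0 ∨ width = 1 := by omega
      rcases h01 with h0 | h1
      · rw [h0, zero_pow (Nat.succ_ne_zero d)] at h; omega
      · rw [h1, one_pow] at h; omega
    have hWpos : (0 : Int) < width := by omega
    have hdm := Int.mul_ediv_add_emod n width -- width * (n / width) + n % width = n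
    have hps : width ^ (d + 1) = width * width ^ d := pow_succ' width d
    have hmul : width * (n / width + 1) = width * (n / width) + width := by ring
    have hmlt : n % width < width := Int.emod_lt_of_pos n hWpos
    have hmnn : 0 ≤ n % width := Int.emod_nonneg n (by omega)
    rw [digs_succ width hW, digs_succ width hW]
    by_cases hc : n % width = width - 1
    · -- carry: digit is maximal
      have heq : n + 1 = width * (n / width + 1) := by omega
      have hq : (n + 1) / width = n / width + 1 := by
        rw [heq, Int.mul_ediv_cancel_left _ (by omega)]
      have hr : (n + 1) % width = 0 := by
        rw [heq]; exact Int.mul_emod_right _ _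
      have hqn : 0 ≤ n / width := Int.ediv_nonneg hn hW
      have hqlt : n / width + 1 + 1 ≤ width ^ d := by
        have h2 : width * (n / width + 1) < width * width ^ d := by omega
        have := lt_of_mul_lt_mul_left h2 hW
        omega
      show (if n % width = width - 1 then 0 :: pyCarry width (digs width d (n / width))
            else (n % width + 1) :: digs width d (n / width))
           = ((n + 1) % width) :: digs width d ((n + 1) / width)
      rw [if_pos hc, hq, hr, ih (n / width) hqn (by omega)]
    · -- no carry: increment the low digit
      have huniq := (Int.ediv_emod_unique (a := n + 1) (b := width)
          (q := n / width) (r := n % width + 1) hWpos).mpr ⟨by omega, by omega, by omega⟩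
      show (if n % width = width - 1 then 0 :: pyCarry width (digs width d (n / width))
            else (n % width + 1) :: digs width d (n / width))
           = ((n + 1) % width) :: digs width d ((n + 1) / width)
      rw [if_neg hc, huniq.1, huniq.2]

-- the fold invariant of A's loop: after m steps, coords holds the digit strings of
-- 0..m-1 and curr holds the digits of min m (total-1)
theorem fold_inv (width : Int) (D : Nat) (hW : 0 ≤ width)
    (hT : 1 ≤ width ^ D) :
    ∀ m : Nat, (m : Int) ≤ width ^ D →
      (PySem.List.pyRange 0 m 1).foldl
        (fun (st : List (List Int) × List Int) i =>
          let coords := st.1 ++ [st.2]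
          let curr := if i ≠ width ^ D - 1 then pyCarry width st.2 else st.2
          (coords, curr))
        ([], digs width D 0)
      = ((List.range m).map (fun (i : Nat) => digs width D (i : Int)),
         digs width D (min (m : Int) (width ^ D - 1))) := by
  intro m
  induction m with
  | zero =>
    intro _
    rw [PySem.List.pyRange_one_eq_nil (by omega)]
    have hmin : min (0 : Int) (width ^ D - 1) = 0 := by omega
    simp only [List.foldl_nil, List.range_zero, List.map_nil, Nat.cast_zero, hmin]
  | succ m ih =>
    intro hm
    have hm' : (m : Int) ≤ width ^ D := by push_cast at hm ⊢; omega
    rw [show ((m + 1 : Nat) : Int) = (m : Int) + 1 by push_cast; ring,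
        PySem.List.pyRange_one_succ_right (by omega), List.foldl_append, ih hm']
    have hmin : min (m : Int) (width ^ D - 1) = (m : Int) := by
      push_cast at hm; omega
    rw [hmin]
    simp only [List.foldl_cons, List.foldl_nil]
    refine Prod.ext ?_ ?_
    · simp [List.range_succ]
    · simp only
      by_cases hlast : (m : Int) = width ^ D - 1
      · rw [if_neg (by omega)]
        have : min ((m : Int) + 1) (width ^ D - 1) = (m : Int) := by omega
        rw [this]
      · rw [if_pos (by omega)]
        have hlt : (m : Int) + 1 < width ^ D := by push_cast at hm; omega
        rw [carry_digs width hW D (m : Int) (by positivity) hlt]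
        have : min ((m : Int) + 1) (width ^ D - 1) = (m : Int) + 1 := by omega
        rw [this]

theorem enumerate_points_spec : Claim_equal_enumerate_points := by
  intro dim width _ hpre
  obtain ⟨hd, hw⟩ := hpre
  unfold Spec_enumerate_points enumerate_points enumerate_points_alt
  simp only
  set D := dim.toNat with hD
  set T : Int := width ^ D with hTdef
  by_cases hT : 1 ≤ T
  case neg =>
    -- total ≤ 0: both sides are the empty list
    rw [PySem.List.pyRange_one_eq_nil (by omega)]
    simp
  -- total ≥ 1
  by_cases hW : 0 ≤ width
  case neg =>
    -- negative width: Pre_ leaves only dim = 0, odd dim (then total < 0,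
    -- handled above) and width = -1; in the surviving cases total = 1 and the
    -- single point is all zeros on both sides
    have hr1 : PySem.List.pyRange 0 1 1 = [0] := by decide
    have hmodneg1 : ∀ q : Int, PySem.Int.mod q (-1) = 0 := by
      intro q
      have := PySem.Int.mod_neg_bounds (a := q) (b := -1) (by norm_num)
      omega
    rcases hw with h0 | hdim0 | hodd | hm1
    · omega
    · -- dim = 0
      have hD0 : D = 0 := by omega
      have hT1 : T = 1 := by rw [hTdef, hD0, pow_zero]
      rw [hT1, hr1, hdim0]
      simp [hD0, PySem.List.pyRange_one_eq_nil (le_refl (0 : Int))]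
    · -- dim odd: total = width ^ dim < 0, contradicting 1 ≤ T
      exfalso
      have hDodd : Odd D := by
        refine Nat.odd_iff.mpr ?_
        omega
      have : T < 0 := by
        rw [hTdef]
        exact Odd.pow_neg hDodd (by omega)
      omega
    · -- width = -1
      subst hm1
      rcases Nat.even_or_odd D with heven | hodd'
      · have hT1 : T = 1 := by rw [hTdef]; exact Even.neg_one_pow heven
        rw [hT1, hr1]
        simp only [List.foldl_cons, List.foldl_nil, List.map_cons, List.map_nil]
        refine congrArg (fun l => [l]) ?_
        rw [PySem.List.pyRange_one 0 dim]
        simp only [sub_zero, List.map_map]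
        calc List.replicate D (0 : Int)
            = (List.range D).map (fun _ => (0 : Int)) := by
              rw [List.map_const']; simp
          _ = (List.range D).map
                ((fun i => PySem.Int.mod (PySem.Int.floordiv 0 ((-1) ^ i.toNat)) (-1)) ∘
                  fun k : Nat => (0 : Int) + (k : Int)) := by
              apply List.map_congr_left
              intro k _
              exact (hmodneg1 _).symm
          _ = _ := by rfl
      · exfalso
        have : T < 0 := by rw [hTdef]; exact Odd.pow_neg hodd' (by norm_num)
        omega
  -- 0 ≤ width and total ≥ 1
  case pos =>
    have hT0 : 0 ≤ T := by positivity
    by_cases hw0 : width = 0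
    · -- then 0^D = T ≥ 1 forces D = 0, hence dim = 0
      have hD0 : D = 0 := by
        by_contra hne
        rw [hTdef, hw0, zero_pow hne] at hT; omega
      have hdim0 : dim = 0 := by omega
      subst hw0; subst hdim0
      decide
    · have hWpos : (0 : Int) < width := by omega
      -- both sides are maps of the digit strings over range T
      have hTnat : ((T.toNat : Nat) : Int) = T := Int.toNat_of_nonneg hT0
      rw [← digs_zero width D]
      have := fold_inv width D hW hT T.toNat (by omega)
      rw [hTnat] at this
      rw [this]
      simp only
      rw [PySem.List.pyRange_one 0 T]
      simp only [sub_zero, List.map_map]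
      apply List.map_congr_left
      intro i _
      simp only [Function.comp, zero_add]
      unfold digs
      rw [PySem.List.pyRange_one 0 dim]
      simp only [sub_zero, hD, List.map_map]
      apply List.map_congr_left
      intro k _
      simp only [Function.comp, zero_add, Int.toNat_natCast]
      have hpk : (0 : Int) < width ^ k := by positivity
      rw [PySem.Int.floordiv_eq_ediv_of_pos hpk, PySem.Int.mod_eq_emod_of_pos hWpos]
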